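-- pv_equiv track=rewrite | github.com/littlealan-dev/ai-singer-diffsinger | src/api/voicebank.py | _resolve_default_voice_color
-- ===== SOURCE A (Python) =====
-- from typing import Any, Dict, List, Optional, Union
--
-- def _resolve_default_voice_color(voice_colors: List[Dict[str, str]]) -> Optional[str]:
--     """Pick a preferred voice color name using common defaults."""
--     if not voice_colors:
--         return None
--     preferred = ("normal", "standard", "default")
--     for keyword in preferred:
--         for entry in voice_colors:
--             name = entry.get("name", "")
--             if keyword in name.lower():
--                 return name
--     return voice_colors[0].get("name")
-- ===== SOURCE B (Python) =====
-- from typing import Dict, List, Optional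
--
--
-- def _resolve_default_voice_color(voice_colors: List[Dict[str, str]]) -> Optional[str]:
--     """Pick a preferred voice color name using common defaults (single-pass argmin)."""
--     if not voice_colors:
--         return None
--     preferred = ("normal", "standard", "default")
--
--     def rank(entry):
--         low = entry.get("name", "").lower()
--         for i, kw in enumerate(preferred):
--             if kw in low:
--                 return i
--         return len(preferred)
--
--     _pos, best = min(enumerate(voice_colors), key=lambda pe: (rank(pe[1]), pe[0]))
--     if rank(best) == len(preferred):
--         return voice_colors[0].get("name")
--     return best.get("name", "")
-- ===== Notes on version B (the rewrite author's own statement) =====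
-- stated objective: alternative
-- what changed: A scans the whole entry list once per keyword (keyword-major nested loops with early return); B makes a single pass, ranking each entry by the index of the first matching keyword and selecting the (rank, position)-minimal entry with min over enumerate.
import Mathlib
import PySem

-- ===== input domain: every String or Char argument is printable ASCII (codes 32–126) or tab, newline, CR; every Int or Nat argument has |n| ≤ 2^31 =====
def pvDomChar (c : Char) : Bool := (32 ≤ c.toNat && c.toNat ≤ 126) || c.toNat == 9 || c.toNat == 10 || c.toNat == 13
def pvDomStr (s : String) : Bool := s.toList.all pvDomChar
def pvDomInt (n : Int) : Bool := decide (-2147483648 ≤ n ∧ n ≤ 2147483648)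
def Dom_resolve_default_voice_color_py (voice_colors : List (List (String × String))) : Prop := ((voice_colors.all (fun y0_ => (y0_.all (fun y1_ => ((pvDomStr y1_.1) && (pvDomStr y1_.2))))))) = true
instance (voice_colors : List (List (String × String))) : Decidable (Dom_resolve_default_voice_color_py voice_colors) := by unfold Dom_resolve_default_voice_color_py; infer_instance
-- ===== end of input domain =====

-- B replaces A's keyword-major double scan by a single argmin pass over the entries
-- keyed by (keyword-priority rank, position); objective: alternative decomposition, not speed.

-- ===== PORT A =====
-- inner 'for entry in voice_colors' loop for one keyword (early return on match)
def pvAScan (kw : String) : List (List (String × String)) → Option String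
  | [] => none
  | e :: rest =>
    let name := PySem.Dict.getD (PySem.Dict.mk e) "name" ""
    if PySem.Str.isIn kw (PySem.Str.lower name) then some name else pvAScan kw rest

def resolve_default_voice_color_py (voice_colors : List (List (String × String))) : Option String :=
  match voice_colors with
  | [] => none
  | e0 :: _ =>
    -- outer 'for keyword in preferred' loop, unrolled over the 3-tuple
    match pvAScan "normal" voice_colors with
    | some n => some n
    | none =>
      match pvAScan "standard" voice_colors with
      | some n => some n
      | none =>
        match pvAScan "default" voice_colors with
        | some n => some n
        | none => PySem.Dict.get? (PySem.Dict.mk e0) "name"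

-- ===== PORT B =====
-- rank(entry): index of first preferred keyword contained in name.lower(), else len(preferred)
def pvAltRankGo (low : String) : List String → Nat → Nat
  | [], i => i
  | kw :: rest, i => if PySem.Str.isIn kw low then i else pvAltRankGo low rest (i + 1)

def pvAltRank (e : List (String × String)) : Nat :=
  pvAltRankGo (PySem.Str.lower (PySem.Dict.getD (PySem.Dict.mk e) "name" ""))
    ["normal", "standard", "default"] 0

-- min(enumerate(voice_colors), key=(rank, pos)): fold keeping the first key-minimal pair
def pvAltMin : List (List (String × String)) → Nat → ((Nat × Nat) × List (String × String)) →
    ((Nat × Nat) × List (String × String))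
  | [], _, best => best
  | e :: rest, pos, ((br, bp), be) =>
    let r := pvAltRank e
    if r < br ∨ (r = br ∧ pos < bp) then pvAltMin rest (pos + 1) ((r, pos), e)
    else pvAltMin rest (pos + 1) ((br, bp), be)

def resolve_default_voice_color_py_alt (voice_colors : List (List (String × String))) : Option String :=
  match voice_colors with
  | [] => none
  | e0 :: rest =>
    let best := (pvAltMin rest 1 ((pvAltRank e0, 0), e0)).2
    if pvAltRank best = 3 then PySem.Dict.get? (PySem.Dict.mk e0) "name"
    else some (PySem.Dict.getD (PySem.Dict.mk best) "name" "")

-- ===== PRECONDITION & SPEC =====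
def Spec_resolve_default_voice_color_py (voice_colors : List (List (String × String))) (out : Option String) : Prop := out = resolve_default_voice_color_py_alt voice_colors
instance (voice_colors : List (List (String × String))) (out : Option String) : Decidable (Spec_resolve_default_voice_color_py voice_colors out) := by unfold Spec_resolve_default_voice_color_py; infer_instance

-- ===== CLAIM (what is proved, stated in full; the proofs are below) =====
def Claim_equal_resolve_default_voice_color_py : Prop := ∀ (voice_colors : List (List (String × String))), Dom_resolve_default_voice_color_py voice_colors → Spec_resolve_default_voice_color_py voice_colors (resolve_default_voice_color_py voice_colors)

-- ===== LEMMAS AND PROOFS =====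

-- proof-only helpers
def pvName (e : List (String × String)) : String :=
  PySem.Dict.getD (PySem.Dict.mk e) "name" ""

def pvCont (kw : String) (e : List (String × String)) : Bool :=
  PySem.Str.isIn kw (PySem.Str.lower (pvName e))

-- running strict argmin over the entries (positions abstracted away)
def pvFmf (be : List (String × String)) : List (List (String × String)) → List (String × String)
  | [] => be
  | e :: rest => if pvAltRank e < pvAltRank be then pvFmf e rest else pvFmf be rest

lemma pvRank_def (e : List (String × String)) :
    pvAltRank e = if pvCont "normal" e then 0 else if pvCont "standard" e then 1
      else if pvCont "default" e then 2 else 3 := by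
  simp [pvAltRank, pvAltRankGo, pvCont, pvName]

lemma pvRank_le_three (e : List (String × String)) : pvAltRank e ≤ 3 := by
  rw [pvRank_def]; split_ifs <;> omega

lemma pvFmf_min (rest : List (List (String × String))) :
    ∀ be, ∀ x ∈ be :: rest, pvAltRank (pvFmf be rest) ≤ pvAltRank x := by
  induction rest with
  | nil =>
    intro be x hx
    rcases List.mem_cons.1 hx with hx | hx
    · rw [hx]; simp [pvFmf]
    · simp at hx
  | cons e r ih =>
    intro be x hx
    by_cases h : pvAltRank e < pvAltRank be
    · simp only [pvFmf, if_pos h]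
      rcases List.mem_cons.1 hx with hx | hx
      · rw [hx]; exact le_trans (ih e e (by simp)) (le_of_lt h)
      · exact ih e x hx
    · simp only [pvFmf, if_neg h]
      rcases List.mem_cons.1 hx with hx | hx
      · rw [hx]; exact ih be be (by simp)
      · rcases List.mem_cons.1 hx with hx | hx
        · rw [hx]; exact le_trans (ih be be (by simp)) (by omega)
        · exact ih be x (by simp [hx])

lemma pvFmf_rank_eq (rest : List (List (String × String))) :
    ∀ be, pvAltRank (pvFmf be rest) = pvAltRank be → pvFmf be rest = be := by
  induction rest with
  | nil => intro be _; rfl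
  | cons e r ih =>
    intro be h
    by_cases hlt : pvAltRank e < pvAltRank be
    · exfalso
      have := pvFmf_min r e e (by simp)
      simp [pvFmf, hlt] at h
      omega
    · simp only [pvFmf, if_neg hlt] at h ⊢
      exact ih be h

lemma pvFmf_find? (rest : List (List (String × String))) :
    ∀ be, (be :: rest).find? (fun e => pvAltRank e == pvAltRank (pvFmf be rest)) =
      some (pvFmf be rest) := by
  induction rest with
  | nil =>
    intro be
    simp [pvFmf]
  | cons e r ih =>
    intro be
    by_cases hlt : pvAltRank e < pvAltRank be
    · have hM : pvAltRank (pvFmf e r) ≤ pvAltRank e := pvFmf_min r e e (by simp)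
      simp only [pvFmf, if_pos hlt]
      have hb : (pvAltRank be == pvAltRank (pvFmf e r)) = false := by
        simp only [beq_eq_false_iff_ne]; omega
      rw [List.find?_cons_of_neg (by simp [hb])]
      exact ih e
    · simp only [pvFmf, if_neg hlt]
      by_cases heq : pvAltRank be = pvAltRank (pvFmf be r)
      · have hbe : pvFmf be r = be := pvFmf_rank_eq r be heq.symm
        rw [hbe]
        rw [List.find?_cons_of_pos (by simp)]
      · have hMle : pvAltRank (pvFmf be r) ≤ pvAltRank be := pvFmf_min r be be (by simp)
        have hb : (pvAltRank be == pvAltRank (pvFmf be r)) = false := by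
          simp only [beq_eq_false_iff_ne]; exact heq
        have hbe' : (pvAltRank e == pvAltRank (pvFmf be r)) = false := by
          simp only [beq_eq_false_iff_ne]; omega
        rw [List.find?_cons_of_neg (by simp [hb]), List.find?_cons_of_neg (by simp [hbe'])]
        have h' := ih be
        rw [List.find?_cons_of_neg (by simp [hb])] at h'
        exact h'

lemma pvAltMin_eq (rest : List (List (String × String))) :
    ∀ pos bp be, bp < pos →
      (pvAltMin rest pos ((pvAltRank be, bp), be)).2 = pvFmf be rest := by
  induction rest with
  | nil => intro pos bp be _; rfl
  | cons e r ih =>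
    intro pos bp be hbp
    by_cases hlt : pvAltRank e < pvAltRank be
    · simp only [pvAltMin, pvFmf, if_pos (Or.inl hlt), if_pos hlt]
      exact ih (pos + 1) pos e (by omega)
    · have hcond : ¬ (pvAltRank e < pvAltRank be ∨ (pvAltRank e = pvAltRank be ∧ pos < bp)) := by
        rintro (h | ⟨-, hp⟩)
        · exact hlt h
        · omega
      simp only [pvAltMin, pvFmf, if_neg hcond, if_neg hlt]
      exact ih (pos + 1) bp be (by omega)

lemma pvFind?_congr_mem {α : Type} (p q : α → Bool) :
    ∀ l : List α, (∀ x ∈ l, p x = q x) → l.find? p = l.find? q := by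
  intro l
  induction l with
  | nil => intro _; rfl
  | cons a t ih =>
    intro h
    have ha := h a (by simp)
    by_cases hp : p a = true
    · rw [List.find?_cons_of_pos hp, List.find?_cons_of_pos (ha ▸ hp)]
    · rw [List.find?_cons_of_neg hp, List.find?_cons_of_neg (ha ▸ hp)]
      exact ih (fun x hx => h x (by simp [hx]))

lemma pvAScan_eq (kw : String) (l : List (List (String × String))) :
    pvAScan kw l = (l.find? (fun e => pvCont kw e)).map pvName := by
  induction l with
  | nil => rfl
  | cons e rest ih =>
    by_cases h : pvCont kw e = true
    · rw [List.find?_cons_of_pos (p := fun e => pvCont kw e) h]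
      simp only [pvCont, pvName] at h
      simp only [pvAScan, if_pos h, Option.map_some, pvName]
    · rw [List.find?_cons_of_neg (p := fun e => pvCont kw e) (by simpa using h)]
      simp only [pvCont, pvName] at h
      simp only [pvAScan, if_neg h]
      exact ih

-- Bool bridges between containment tests and rank values
lemma pvCont0_eq (e : List (String × String)) : pvCont "normal" e = (pvAltRank e == 0) := by
  rw [pvRank_def]; split_ifs <;> simp_all

lemma pvCont1_eq (e : List (String × String)) (h : 1 ≤ pvAltRank e) :
    pvCont "standard" e = (pvAltRank e == 1) := by
  rw [pvRank_def] at h ⊢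
  split_ifs at h ⊢ with h1 h2 h3 <;> simp_all

lemma pvCont2_eq (e : List (String × String)) (h : 2 ≤ pvAltRank e) :
    pvCont "default" e = (pvAltRank e == 2) := by
  rw [pvRank_def] at h ⊢
  split_ifs at h ⊢ with h1 h2 h3 <;> simp_all

lemma pvCont_false_of_rank (e : List (String × String)) :
    (1 ≤ pvAltRank e → pvCont "normal" e = false) ∧
    (2 ≤ pvAltRank e → pvCont "standard" e = false) ∧
    (3 ≤ pvAltRank e → pvCont "default" e = false) := by
  rw [pvRank_def]
  split_ifs with h1 h2 h3 <;> simp_all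

-- ===== VERDICT (by name: the statement is the Claim_ definition above) =====
theorem resolve_default_voice_color_py_spec : Claim_equal_resolve_default_voice_color_py := by
  intro voice_colors _
  unfold Spec_resolve_default_voice_color_py
  match voice_colors with
  | [] => rfl
  | e0 :: rest =>
    have hB : resolve_default_voice_color_py_alt (e0 :: rest) =
        (if pvAltRank (pvFmf e0 rest) = 3 then PySem.Dict.get? (PySem.Dict.mk e0) "name"
         else some (pvName (pvFmf e0 rest))) := by
      simp only [resolve_default_voice_color_py_alt]
      rw [pvAltMin_eq rest 1 0 e0 (by omega)]
      rfl
    have hmin : ∀ x ∈ e0 :: rest, pvAltRank (pvFmf e0 rest) ≤ pvAltRank x := pvFmf_min rest e0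
    have hfind : (e0 :: rest).find? (fun e => pvAltRank e == pvAltRank (pvFmf e0 rest)) =
        some (pvFmf e0 rest) := pvFmf_find? rest e0
    have hM3 : pvAltRank (pvFmf e0 rest) ≤ 3 := pvRank_le_three (pvFmf e0 rest)
    rw [hB]
    simp only [resolve_default_voice_color_py]
    interval_cases hMv : (pvAltRank (pvFmf e0 rest))
    · -- M = 0 : first keyword matches
      have h0 : pvAScan "normal" (e0 :: rest) = some (pvName (pvFmf e0 rest)) := by
        rw [pvAScan_eq,
          pvFind?_congr_mem (fun e => pvCont "normal" e) (fun e => pvAltRank e == 0) (e0 :: rest)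
            (fun x _ => pvCont0_eq x), hfind]
        rfl
      rw [h0]
      rfl
    · -- M = 1
      have hc0 : pvAScan "normal" (e0 :: rest) = none := by
        rw [pvAScan_eq, List.find?_eq_none.2 (fun x hx => by
          simp [(pvCont_false_of_rank x).1 (by have := hmin x hx; omega)])]
        rfl
      have h1 : pvAScan "standard" (e0 :: rest) = some (pvName (pvFmf e0 rest)) := by
        rw [pvAScan_eq,
          pvFind?_congr_mem (fun e => pvCont "standard" e) (fun e => pvAltRank e == 1) (e0 :: rest)
            (fun x hx => pvCont1_eq x (by have := hmin x hx; omega)), hfind]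
        rfl
      rw [hc0, h1]
      rfl
    · -- M = 2
      have hc0 : pvAScan "normal" (e0 :: rest) = none := by
        rw [pvAScan_eq, List.find?_eq_none.2 (fun x hx => by
          simp [(pvCont_false_of_rank x).1 (by have := hmin x hx; omega)])]
        rfl
      have hc1 : pvAScan "standard" (e0 :: rest) = none := by
        rw [pvAScan_eq, List.find?_eq_none.2 (fun x hx => by
          simp [(pvCont_false_of_rank x).2.1 (by have := hmin x hx; omega)])]
        rfl
      have h2 : pvAScan "default" (e0 :: rest) = some (pvName (pvFmf e0 rest)) := by
        rw [pvAScan_eq,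
          pvFind?_congr_mem (fun e => pvCont "default" e) (fun e => pvAltRank e == 2) (e0 :: rest)
            (fun x hx => pvCont2_eq x (by have := hmin x hx; omega)), hfind]
        rfl
      rw [hc0, hc1, h2]
      rfl
    · -- M = 3 : no keyword matches anywhere
      have hc0 : pvAScan "normal" (e0 :: rest) = none := by
        rw [pvAScan_eq, List.find?_eq_none.2 (fun x hx => by
          simp [(pvCont_false_of_rank x).1 (by have := hmin x hx; omega)])]
        rfl
      have hc1 : pvAScan "standard" (e0 :: rest) = none := by
        rw [pvAScan_eq, List.find?_eq_none.2 (fun x hx => by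
          simp [(pvCont_false_of_rank x).2.1 (by have := hmin x hx; omega)])]
        rfl
      have hc2 : pvAScan "default" (e0 :: rest) = none := by
        rw [pvAScan_eq, List.find?_eq_none.2 (fun x hx => by
          simp [(pvCont_false_of_rank x).2.2 (by have := hmin x hx; omega)])]
        rfl
      rw [hc0, hc1, hc2]
      rfl
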